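-- pv_equiv track=rewrite | github.com/dahuilangda/Boltz-WebUI | lead_optimization/mmp_lifecycle/engine.py | _resolve_smiles_column
-- ===== SOURCE A (Python) =====
-- from typing import Dict, Iterable, List, Optional, Sequence, Tuple
--
-- def _resolve_smiles_column(headers: List[str], preferred_column: str = "") -> str:
--     normalized_headers = {str(h or "").strip().lower(): str(h or "").strip() for h in headers}
--     preferred = str(preferred_column or "").strip()
--     if preferred:
--         direct = normalized_headers.get(preferred.lower())
--         if direct:
--             return direct
--         raise ValueError(f"Requested smiles column '{preferred}' not found in file headers.")
--
--     for candidate in ("smiles", "canonical_smiles", "mol_smiles", "molecule_smiles", "query_smiles"):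
--         resolved = normalized_headers.get(candidate)
--         if resolved:
--             return resolved
--     raise ValueError("No SMILES column found. Expected one of: smiles/canonical_smiles/mol_smiles.")
-- ===== SOURCE B (Python) =====
-- _CANDIDATES = ("smiles", "canonical_smiles", "mol_smiles", "molecule_smiles", "query_smiles")
--
-- def _resolve_smiles_column(headers, preferred_column=""):
--     # Single forward pass: score every matching header by (key priority, -position)
--     # and keep the lexicographic minimum; that is "first key in priority order,
--     # and among equal keys the last header wins" - no dict, no per-key rescans.
--     preferred = str(preferred_column or "").strip()
--     keys = (preferred.lower(),) if preferred else _CANDIDATES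
--     best = None  # ((rank, -pos), stripped_header)
--     for pos, h in enumerate(headers):
--         s = str(h or "").strip()
--         low = s.lower()
--         if low in keys:
--             score = (keys.index(low), -pos)
--             if best is None or score < best[0]:
--                 best = (score, s)
--     if best is not None:
--         return best[1]
--     if preferred:
--         raise ValueError(f"Requested smiles column '{preferred}' not found in file headers.")
--     raise ValueError("No SMILES column found. Expected one of: smiles/canonical_smiles/mol_smiles.")
-- ===== Notes on version B (the rewrite author's own statement) =====
-- stated objective: alternative
-- what changed: Replaces A's normalized-header dict plus per-key lookups by a single forward pass that scores each matching header with a (key-priority, -position) pair and keeps the lexicographic minimum.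
import Mathlib
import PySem

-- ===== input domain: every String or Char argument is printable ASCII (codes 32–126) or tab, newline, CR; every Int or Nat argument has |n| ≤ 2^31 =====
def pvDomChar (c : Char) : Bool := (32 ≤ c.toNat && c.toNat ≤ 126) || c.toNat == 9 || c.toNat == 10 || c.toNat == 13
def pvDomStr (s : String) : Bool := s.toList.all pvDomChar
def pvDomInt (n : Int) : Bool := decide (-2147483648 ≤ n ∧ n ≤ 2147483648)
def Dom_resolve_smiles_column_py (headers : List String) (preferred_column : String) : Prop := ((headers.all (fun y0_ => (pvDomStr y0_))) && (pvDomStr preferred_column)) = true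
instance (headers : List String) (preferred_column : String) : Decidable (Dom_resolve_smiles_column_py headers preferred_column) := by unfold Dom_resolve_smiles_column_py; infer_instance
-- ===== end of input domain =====

-- B replaces A's normalized-header dict plus per-key lookups by ONE forward pass that scores each
-- matching header with a (key-priority, -position) pair and keeps the lexicographic minimum;
-- equivalence is proved on Pre_, the inputs where A returns (does not raise).

-- ===== PORT A =====
-- Python's `str(h or "").strip()` on a str argument h is just h.strip() (h or "" = h for strings).
def pvCandLoopA (nh : PySem.Dict String String) : List String → String
  | [] => ""  -- raise ValueError("No SMILES column found. ..."): outside Pre_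
  | c :: rest =>
    match nh.get? c with
    | some resolved => if resolved ≠ "" then resolved else pvCandLoopA nh rest
    | none => pvCandLoopA nh rest

def resolve_smiles_column_py (headers : List String) (preferred_column : String) : String :=
  let normalized_headers : PySem.Dict String String :=
    headers.foldl (fun d h => d.insert (PySem.Str.lower (PySem.Str.strip h)) (PySem.Str.strip h)) PySem.Dict.empty
  let preferred := PySem.Str.strip preferred_column
  if preferred ≠ "" then
    match normalized_headers.get? (PySem.Str.lower preferred) with
    | some direct => if direct ≠ "" then direct else ""  -- raise ValueError: outside Pre_
    | none => ""  -- raise ValueError: outside Pre_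
  else
    pvCandLoopA normalized_headers ["smiles", "canonical_smiles", "mol_smiles", "molecule_smiles", "query_smiles"]

-- ===== PORT B =====
-- Python tuple comparison score < best[0] on (int, int) is lexicographic:
def pvScoreLt (a b : Int × Int) : Bool := a.1 < b.1 || (a.1 == b.1 && a.2 < b.2)

-- the loop body of Source B: `if low in keys:` + `keys.index(low)` are together PySem.List.index?
def pvStepB (keys : List String) (best : Option ((Int × Int) × String)) (ph : Int × String) : Option ((Int × Int) × String) :=
  let s := PySem.Str.strip ph.2
  let low := PySem.Str.lower s
  match PySem.List.index? keys low with
  | none => best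
  | some r =>
    let score : Int × Int := ((r : Int), -ph.1)
    match best with
    | none => some (score, s)
    | some b => if pvScoreLt score b.1 then some (score, s) else best

def resolve_smiles_column_py_alt (headers : List String) (preferred_column : String) : String :=
  let preferred := PySem.Str.strip preferred_column
  let keys : List String :=
    if preferred ≠ "" then [PySem.Str.lower preferred]
    else ["smiles", "canonical_smiles", "mol_smiles", "molecule_smiles", "query_smiles"]
  match (PySem.List.enumerate headers 0).foldl (pvStepB keys) none with
  | some b => b.2
  | none => ""  -- raise ValueError (preferred / default message): outside Pre_

-- ===== PRECONDITION & SPEC =====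
-- Pre_ = exactly the inputs where Python A returns normally (no ValueError): some header
-- normalizes to the requested/candidate key (a matching header's stripped value is then
-- automatically non-empty, since the key itself is non-empty).
def Pre_resolve_smiles_column_py (headers : List String) (preferred_column : String) : Prop :=
  if PySem.Str.strip preferred_column = "" then
    ∃ c ∈ (["smiles", "canonical_smiles", "mol_smiles", "molecule_smiles", "query_smiles"] : List String),
      ∃ h ∈ headers, PySem.Str.lower (PySem.Str.strip h) = c
  else
    ∃ h ∈ headers, PySem.Str.lower (PySem.Str.strip h) = PySem.Str.lower (PySem.Str.strip preferred_column)
instance (headers : List String) (preferred_column : String) : Decidable (Pre_resolve_smiles_column_py headers preferred_column) := by unfold Pre_resolve_smiles_column_py; infer_instance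

def pvWitness_resolve_smiles_column_py : List String × String := (["smiles"], "")

def Spec_resolve_smiles_column_py (headers : List String) (preferred_column : String) (out : String) : Prop := out = resolve_smiles_column_py_alt headers preferred_column
instance (headers : List String) (preferred_column : String) (out : String) : Decidable (Spec_resolve_smiles_column_py headers preferred_column out) := by unfold Spec_resolve_smiles_column_py; infer_instance

-- ===== CLAIM (what is proved, stated in full; the proofs are below) =====
def Claim_equal_resolve_smiles_column_py : Prop := ∀ (headers : List String) (preferred_column : String), Dom_resolve_smiles_column_py headers preferred_column → Pre_resolve_smiles_column_py headers preferred_column → Spec_resolve_smiles_column_py headers preferred_column (resolve_smiles_column_py headers preferred_column)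

-- ===== LEMMAS AND PROOFS =====

-- --- proof-only helpers: both ports are funnelled into pvFloop keys headers ---

-- last header of hs whose stripped, lowercased form is k (its stripped form)
def pvLastMatch (k : String) : List String → Option String
  | [] => none
  | h :: t =>
    match pvLastMatch k t with
    | some s => some s
    | none => if PySem.Str.lower (PySem.Str.strip h) = k then some (PySem.Str.strip h) else none

-- reference function: first key (in priority order) having a match; its last match
def pvFloop (hs : List String) : List String → String
  | [] => ""
  | k :: rest =>
    match pvLastMatch k hs with
    | some s => s
    | none => pvFloop hs rest

-- positionless abstraction of B's accumulator: (rank, string), later entry wins ties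
def pvComb (a b : Option (Nat × String)) : Option (Nat × String) :=
  match a, b with
  | x, none => x
  | none, some bb => some bb
  | some aa, some bb => if bb.1 ≤ aa.1 then some bb else some aa

def pvPB (keys : List String) : List String → Option (Nat × String)
  | [] => none
  | h :: t =>
    pvComb ((PySem.List.index? keys (PySem.Str.lower (PySem.Str.strip h))).map
              (fun r => (r, PySem.Str.strip h)))
           (pvPB keys t)

def pvStrOf : Option (Nat × String) → String
  | none => ""
  | some x => x.2

-- --- A side: the dict lookup is pvLastMatch ---

def pvFindLastB (key : String) : List String → Option String
  | [] => none
  | h :: t =>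
    let s := PySem.Str.strip h
    if PySem.Str.lower s = key then some s else pvFindLastB key t

lemma pvFindLastB_append (key : String) (l1 l2 : List String) :
    pvFindLastB key (l1 ++ l2) = (pvFindLastB key l1).or (pvFindLastB key l2) := by
  induction l1 with
  | nil => simp [pvFindLastB]
  | cons h t ih =>
    simp only [List.cons_append, pvFindLastB, ih]
    split <;> simp

-- the dict lookup after A's build loop is the reverse scan (last-wins)
lemma pvFoldl_get (hs : List String) (d : PySem.Dict String String) (key : String) :
    (hs.foldl (fun d h => d.insert (PySem.Str.lower (PySem.Str.strip h)) (PySem.Str.strip h)) d).get? key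
      = (pvFindLastB key hs.reverse).or (d.get? key) := by
  induction hs generalizing d with
  | nil => simp [pvFindLastB]
  | cons h t ih =>
    simp only [List.foldl_cons, ih, List.reverse_cons, pvFindLastB_append]
    have hsing : pvFindLastB key [h] =
        if PySem.Str.lower (PySem.Str.strip h) = key then some (PySem.Str.strip h) else none := by
      simp [pvFindLastB]
    rw [hsing, PySem.Dict.get?_insert]
    cases hfind : pvFindLastB key t.reverse with
    | some v => simp
    | none =>
      by_cases hk : PySem.Str.lower (PySem.Str.strip h) = key
      · simp [hk]
      · simp [hk]
        intro h'; exact absurd h'.symm hk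

lemma pvFindLastB_reverse (key : String) (hs : List String) :
    pvFindLastB key hs.reverse = pvLastMatch key hs := by
  induction hs with
  | nil => rfl
  | cons h t ih =>
    rw [List.reverse_cons, pvFindLastB_append, ih]
    show _ = pvLastMatch key (h :: t)
    simp only [pvLastMatch]
    cases pvLastMatch key t with
    | some s => simp [Option.or]
    | none => simp [Option.or, pvFindLastB]

lemma pvDict_get (hs : List String) (key : String) :
    (hs.foldl (fun d h => d.insert (PySem.Str.lower (PySem.Str.strip h)) (PySem.Str.strip h)) PySem.Dict.empty).get? key
      = pvLastMatch key hs := by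
  rw [pvFoldl_get, pvFindLastB_reverse]
  simp

lemma pvLastMatch_lower (k : String) (hs : List String) (s : String)
    (h : pvLastMatch k hs = some s) : PySem.Str.lower s = k := by
  induction hs with
  | nil => simp [pvLastMatch] at h
  | cons x t ih =>
    rw [pvLastMatch] at h
    cases hlt : pvLastMatch k t with
    | some s' => rw [hlt] at h; exact ih (h ▸ hlt)
    | none =>
      rw [hlt] at h
      simp only [] at h
      split at h
      · next hx => cases h; exact hx
      · cases h

lemma pvLower_ne_empty (s : String) (h : s ≠ "") : PySem.Str.lower s ≠ "" := by
  intro he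
  apply h
  have h2 := PySem.Str.toList_lower s
  rw [he] at h2
  have h3 : s.toList.map PySem.Chars.lowerChar = [] := h2.symm
  simpa using h3

lemma pvLastMatch_ne_empty (k : String) (hs : List String) (s : String)
    (hk : k ≠ "") (h : pvLastMatch k hs = some s) : s ≠ "" := by
  intro he
  apply hk
  have := pvLastMatch_lower k hs s h
  rw [he] at this
  exact this.symm

-- A's candidate loop equals pvFloop when every candidate key is non-empty
lemma pvCandLoopA_eq_floop (hs : List String) (cs : List String)
    (hne : ∀ c ∈ cs, c ≠ "") :
    pvCandLoopA (hs.foldl (fun d h => d.insert (PySem.Str.lower (PySem.Str.strip h)) (PySem.Str.strip h)) PySem.Dict.empty) cs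
      = pvFloop hs cs := by
  induction cs with
  | nil => rfl
  | cons c rest ih =>
    simp only [pvCandLoopA, pvFloop, pvDict_get]
    cases hlm : pvLastMatch c hs with
    | some s =>
      have hs' : s ≠ "" := pvLastMatch_ne_empty c hs s (hne c (by simp)) hlm
      simp [hs']
    | none => exact ih (fun c hc => hne c (by simp [hc]))

-- --- abstract level: pvFloop equals the positionless min-scan pvPB ---

lemma pvPB_nil_keys (hs : List String) : pvPB [] hs = none := by
  induction hs with
  | nil => rfl
  | cons h t ih => simp [pvPB, ih, PySem.List.index?, pvComb]

lemma pvPB_cons_key (k : String) (rest : List String) (hs : List String) :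
    pvPB (k :: rest) hs
      = match pvLastMatch k hs with
        | some s => some (0, s)
        | none => (pvPB rest hs).map (fun x => (x.1 + 1, x.2)) := by
  induction hs with
  | nil => rfl
  | cons h t ih =>
    simp only [pvPB, pvLastMatch, ih]
    cases hlt : pvLastMatch k t with
    | some s' =>
      cases hidx : PySem.List.index? (k :: rest) (PySem.Str.lower (PySem.Str.strip h)) <;>
        simp [pvComb]
    | none =>
      by_cases hk : PySem.Str.lower (PySem.Str.strip h) = k
      · rw [hk, PySem.List.index?_cons_self]
        cases pvPB rest t <;> simp [pvComb]
      · rw [PySem.List.index?_cons_of_ne rest (Ne.symm hk), if_neg hk]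
        cases hidx2 : PySem.List.index? rest (PySem.Str.lower (PySem.Str.strip h)) with
        | none => cases pvPB rest t <;> simp [pvComb]
        | some r =>
          cases pvPB rest t with
          | none => simp [pvComb]
          | some bb =>
            simp only [Option.map_some, pvComb]
            by_cases hbr : bb.1 ≤ r
            · rw [if_pos hbr, if_pos (by omega)]
              rfl
            · rw [if_neg hbr, if_neg (by omega)]
              rfl

lemma pvFloop_eq_pb (keys : List String) (hs : List String) :
    pvFloop hs keys = pvStrOf (pvPB keys hs) := by
  induction keys with
  | nil => simp [pvFloop, pvPB_nil_keys, pvStrOf]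
  | cons k rest ih =>
    simp only [pvFloop, pvPB_cons_key]
    cases pvLastMatch k hs with
    | some s => simp [pvStrOf]
    | none =>
      rw [ih]
      cases pvPB rest hs <;> simp [pvStrOf]

-- --- B side: the enumerated fold refines pvPB ---

-- Source B's match at one position
def pvMB (keys : List String) (h : String) (p : Int) : Option ((Int × Int) × String) :=
  (PySem.List.index? keys (PySem.Str.lower (PySem.Str.strip h))).map
    (fun (r : Nat) => (((r : Int), -p), PySem.Str.strip h))

def pvCombB (a b : Option ((Int × Int) × String)) : Option ((Int × Int) × String) :=
  match b with
  | none => a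
  | some bb =>
    match a with
    | none => some bb
    | some aa => if pvScoreLt bb.1 aa.1 then some bb else some aa

lemma pvStepB_eq_combB (keys : List String) (acc : Option ((Int × Int) × String)) (p : Int) (h : String) :
    pvStepB keys acc (p, h) = pvCombB acc (pvMB keys h p) := by
  simp only [pvStepB, pvMB]
  cases PySem.List.index? keys (PySem.Str.lower (PySem.Str.strip h)) with
  | none => cases acc <;> rfl
  | some r => cases acc <;> rfl

lemma pvCombB_assoc (a b c : Option ((Int × Int) × String)) :
    pvCombB (pvCombB a b) c = pvCombB a (pvCombB b c) := by
  cases c with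
  | none => rfl
  | some cc =>
    cases b with
    | none => rfl
    | some bb =>
      cases a with
      | none =>
        simp only [pvCombB]
        split <;> rfl
      | some aa =>
        obtain ⟨⟨b1, b2⟩, bs⟩ := bb
        obtain ⟨⟨a1, a2⟩, as⟩ := aa
        obtain ⟨⟨c1, c2⟩, cs⟩ := cc
        simp only [pvCombB, pvScoreLt]
        split_ifs <;> simp_all <;>
          first
          | omega
          | (split_ifs <;> simp_all <;> omega)

lemma pvFoldB_acc (keys : List String) (hs : List String) :
    ∀ (p : Int) (acc : Option ((Int × Int) × String)),
      (PySem.List.enumerate hs p).foldl (pvStepB keys) acc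
        = pvCombB acc ((PySem.List.enumerate hs p).foldl (pvStepB keys) none) := by
  induction hs with
  | nil => intro p acc; cases acc <;> simp [PySem.List.enumerate_nil, pvCombB]
  | cons h t ih =>
    intro p acc
    rw [PySem.List.enumerate_cons]
    simp only [List.foldl_cons]
    rw [ih (p + 1) (pvStepB keys acc (p, h)), ih (p + 1) (pvStepB keys none (p, h))]
    rw [pvStepB_eq_combB, pvStepB_eq_combB, pvCombB_assoc]
    have hnone : pvCombB none (pvMB keys h p) = pvMB keys h p := by
      cases pvMB keys h p <;> rfl
    rw [hnone]

-- relation between B's fold state and the positionless pvPB state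
def pvRel (x : Option ((Int × Int) × String)) (y : Option (Nat × String)) (p : Int) : Prop :=
  match x, y with
  | none, none => True
  | some a, some b => a.1.1 = (b.1 : Int) ∧ a.2 = b.2 ∧ a.1.2 ≤ -p
  | _, _ => False

lemma pvRel_weaken (x : Option ((Int × Int) × String)) (y : Option (Nat × String)) (p : Int)
    (h : pvRel x y (p + 1)) : pvRel x y p := by
  cases x with
  | none => cases y with
    | none => trivial
    | some b => exact absurd h not_false
  | some a =>
    cases y with
    | none => exact absurd h not_false
    | some b =>
      obtain ⟨h1, h2, h3⟩ := h
      exact ⟨h1, h2, by omega⟩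

lemma pvFoldB_rel (keys : List String) (hs : List String) :
    ∀ (p : Int),
      pvRel ((PySem.List.enumerate hs p).foldl (pvStepB keys) none) (pvPB keys hs) p := by
  induction hs with
  | nil => intro p; simp [PySem.List.enumerate_nil, pvPB, pvRel]
  | cons h t ih =>
    intro p
    rw [PySem.List.enumerate_cons]
    simp only [List.foldl_cons]
    rw [pvFoldB_acc, pvStepB_eq_combB]
    have hnone : pvCombB none (pvMB keys h p) = pvMB keys h p := by
      cases pvMB keys h p <;> rfl
    rw [hnone]
    have hrest := ih (p + 1)
    rw [pvPB]
    cases hidx : PySem.List.index? keys (PySem.Str.lower (PySem.Str.strip h)) with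
    | none =>
      have hm : pvMB keys h p = none := by unfold pvMB; rw [hidx]; rfl
      rw [hm]
      have h1 : pvCombB none ((PySem.List.enumerate t (p+1)).foldl (pvStepB keys) none)
          = (PySem.List.enumerate t (p+1)).foldl (pvStepB keys) none := by
        cases (PySem.List.enumerate t (p+1)).foldl (pvStepB keys) none <;> rfl
      rw [h1]
      have h2 : pvComb (Option.map (fun (r : Nat) => (r, PySem.Str.strip h)) none) (pvPB keys t)
          = pvPB keys t := by
        cases pvPB keys t <;> rfl
      rw [h2]
      exact pvRel_weaken _ _ _ hrest
    | some r =>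
      have hm : pvMB keys h p = some (((r : Int), -p), PySem.Str.strip h) := by
        unfold pvMB; rw [hidx]; rfl
      rw [hm]
      cases hx : (PySem.List.enumerate t (p+1)).foldl (pvStepB keys) none with
      | none =>
        cases hy : pvPB keys t with
        | none => exact ⟨rfl, rfl, le_refl _⟩
        | some bb => rw [hx, hy] at hrest; simp [pvRel] at hrest
      | some xa =>
        cases hy : pvPB keys t with
        | none => rw [hx, hy] at hrest; simp [pvRel] at hrest
        | some bb =>
          rw [hx, hy] at hrest
          obtain ⟨h1, h2, h3⟩ := hrest
          simp only [Option.map_some, pvCombB, pvComb]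
          by_cases hbr : bb.1 ≤ r
          · have hc1 : pvScoreLt xa.1 ((r : Int), -p) = true := by
              simp only [pvScoreLt, Bool.or_eq_true, Bool.and_eq_true,
                decide_eq_true_eq, beq_iff_eq]
              omega
            rw [hc1, if_pos rfl, if_pos hbr]
            exact ⟨h1, h2, by omega⟩
          · have hc1 : ¬ (pvScoreLt xa.1 ((r : Int), -p) = true) := by
              simp only [pvScoreLt, Bool.or_eq_true, Bool.and_eq_true,
                decide_eq_true_eq, beq_iff_eq]
              omega
            rw [if_neg hc1, if_neg hbr]
            exact ⟨rfl, rfl, le_refl _⟩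

lemma pvB_eq_strOf (keys : List String) (hs : List String) :
    (match (PySem.List.enumerate hs 0).foldl (pvStepB keys) none with
     | some b => b.2
     | none => "")
      = pvStrOf (pvPB keys hs) := by
  have h := pvFoldB_rel keys hs 0
  cases hx : (PySem.List.enumerate hs 0).foldl (pvStepB keys) none with
  | none =>
    cases hy : pvPB keys hs with
    | none => simp [pvStrOf]
    | some bb => rw [hx, hy] at h; simp [pvRel] at h
  | some xa =>
    cases hy : pvPB keys hs with
    | none => rw [hx, hy] at h; simp [pvRel] at h
    | some bb => rw [hx, hy] at h; simp [pvStrOf, h.2.1]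

-- both ports equal on every input (the raise branches of both return "")
lemma pv_ports_eq (headers : List String) (preferred_column : String) :
    resolve_smiles_column_py headers preferred_column = resolve_smiles_column_py_alt headers preferred_column := by
  by_cases hp : PySem.Str.strip preferred_column = ""
  · have hA : resolve_smiles_column_py headers preferred_column
        = pvFloop headers ["smiles", "canonical_smiles", "mol_smiles", "molecule_smiles", "query_smiles"] := by
      simp only [resolve_smiles_column_py]
      rw [if_neg (by simp [hp])]
      exact pvCandLoopA_eq_floop headers _ (by decide)
    have hB : resolve_smiles_column_py_alt headers preferred_column
        = pvStrOf (pvPB ["smiles", "canonical_smiles", "mol_smiles", "molecule_smiles", "query_smiles"] headers) := by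
      simp only [resolve_smiles_column_py_alt]
      rw [if_neg (by simp [hp])]
      exact pvB_eq_strOf _ headers
    rw [hA, hB, pvFloop_eq_pb]
  · have hA : resolve_smiles_column_py headers preferred_column
        = pvFloop headers [PySem.Str.lower (PySem.Str.strip preferred_column)] := by
      simp only [resolve_smiles_column_py]
      rw [if_pos hp, pvDict_get]
      have hkne : PySem.Str.lower (PySem.Str.strip preferred_column) ≠ "" :=
        pvLower_ne_empty _ hp
      cases hlm : pvLastMatch (PySem.Str.lower (PySem.Str.strip preferred_column)) headers with
      | some s =>
        have hs' : s ≠ "" := pvLastMatch_ne_empty _ headers s hkne hlm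
        simp [pvFloop, hlm, hs']
      | none => simp [pvFloop, hlm]
    have hB : resolve_smiles_column_py_alt headers preferred_column
        = pvStrOf (pvPB [PySem.Str.lower (PySem.Str.strip preferred_column)] headers) := by
      simp only [resolve_smiles_column_py_alt]
      rw [if_pos hp]
      exact pvB_eq_strOf _ headers
    rw [hA, hB, pvFloop_eq_pb]

-- ===== VERDICT (by name: the statement is the Claim_ definition above) =====
theorem resolve_smiles_column_py_spec : Claim_equal_resolve_smiles_column_py := by
  intro headers preferred_column _ _
  unfold Spec_resolve_smiles_column_py
  exact pv_ports_eq headers preferred_column
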